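-- pv_equiv track=rewrite | github.com/brynnb/pokemon-online | export_scripts/export_map.py | find_tileset_id
-- ===== SOURCE A (Python) =====
-- def find_tileset_id(tileset_name, tileset_constants):
--     """Find a tileset ID by name using various matching strategies"""
--     if not tileset_name:
--         return None
--
--     # Direct match
--     if tileset_name in tileset_constants:
--         return tileset_constants[tileset_name]["id"]
--
--     # Case-insensitive match
--     for const_name, const_info in tileset_constants.items():
--         if const_name.lower() == tileset_name.lower():
--             return const_info["id"]
--
--     # Partial match
--     for const_name, const_info in tileset_constants.items():
--         if (
--             const_name.lower() in tileset_name.lower()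
--             or tileset_name.lower() in const_name.lower()
--         ):
--             return const_info["id"]
--
--     return None
-- ===== SOURCE B (Python) =====
-- def find_tileset_id(tileset_name, tileset_constants):
--     """Find a tileset ID by name using various matching strategies"""
--     if not tileset_name:
--         return None
--
--     target = tileset_name.lower()
--     best_rank = 3
--     best_id = None
--     for const_name, const_info in tileset_constants.items():
--         if const_name == tileset_name:
--             return const_info["id"]
--         key = const_name.lower()
--         if key == target:
--             rank = 1
--         elif key in target or target in key:
--             rank = 2
--         else:
--             continue
--         if rank < best_rank:
--             best_rank = rank
--             best_id = const_info["id"]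
--     return best_id
-- ===== Notes on version B (the rewrite author's own statement) =====
-- stated objective: alternative
-- what changed: Replaces A's three staged scans (exact, case-insensitive, partial) by one single pass that tracks the best match rank seen so far, returning immediately on an exact match.
-- outside the precondition, e.g. on find_tileset_id('ab', {'a': {}, 'ab': {'id': 1}}): A returns 1, B raises KeyError
import Mathlib
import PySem

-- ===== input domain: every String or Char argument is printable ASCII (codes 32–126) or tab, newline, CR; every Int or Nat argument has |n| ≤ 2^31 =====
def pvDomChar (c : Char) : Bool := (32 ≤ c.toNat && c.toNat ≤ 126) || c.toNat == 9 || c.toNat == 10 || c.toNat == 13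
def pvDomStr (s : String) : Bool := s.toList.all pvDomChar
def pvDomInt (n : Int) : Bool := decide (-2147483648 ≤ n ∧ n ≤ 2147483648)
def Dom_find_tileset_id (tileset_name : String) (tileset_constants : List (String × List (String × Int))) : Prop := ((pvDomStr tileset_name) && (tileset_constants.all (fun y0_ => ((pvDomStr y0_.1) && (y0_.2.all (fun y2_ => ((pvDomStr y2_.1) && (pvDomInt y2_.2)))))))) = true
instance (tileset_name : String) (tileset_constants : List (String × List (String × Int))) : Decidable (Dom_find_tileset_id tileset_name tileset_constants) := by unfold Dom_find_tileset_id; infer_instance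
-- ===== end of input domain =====

-- B is an ALTERNATIVE decomposition: one rank-tracking pass instead of A's three staged scans; equal on Pre_ (proved below).

-- ===== PORT A =====
-- const_info["id"]: first pair with key "id" (none = Python KeyError, excluded by Pre_)
def ftiGetId (info : List (String × Int)) : Option Int :=
  (info.find? (fun q => q.1 == "id")).map (·.2)

-- the case-insensitive for-loop: return const_info["id"] at the first lower-equal key
def ftiA_ci (name : String) : List (String × List (String × Int)) → Option Int
  | [] => none
  | (k, info) :: rest =>
    if PySem.Str.lower k == PySem.Str.lower name then ftiGetId info
    else ftiA_ci name rest

-- the partial-match for-loop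
def ftiA_pa (name : String) : List (String × List (String × Int)) → Option Int
  | [] => none
  | (k, info) :: rest =>
    if PySem.Str.isIn (PySem.Str.lower k) (PySem.Str.lower name)
        || PySem.Str.isIn (PySem.Str.lower name) (PySem.Str.lower k) then ftiGetId info
    else ftiA_pa name rest

def find_tileset_id (tileset_name : String) (tileset_constants : List (String × List (String × Int))) : Option Int :=
  if tileset_name == "" then none
  else
    -- direct match: 'tileset_name in tileset_constants' then tileset_constants[tileset_name]["id"]
    match tileset_constants.find? (fun p => p.1 == tileset_name) with
    | some p => ftiGetId p.2
    | none =>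
      match ftiA_ci tileset_name tileset_constants with
      | some v => some v
      | none => ftiA_pa tileset_name tileset_constants

-- ===== PORT B =====
-- single pass maintaining (best_rank, best_id); returns immediately on an exact match
def ftiB_go (name target : String) (bestRank : Nat) (best : Option Int) :
    List (String × List (String × Int)) → Option Int
  | [] => best
  | (k, info) :: rest =>
    if k == name then (info.find? (fun q => q.1 == "id")).map (·.2)
    else
      let key := PySem.Str.lower k
      if key == target then
        if 1 < bestRank then ftiB_go name target 1 ((info.find? (fun q => q.1 == "id")).map (·.2)) rest
        else ftiB_go name target bestRank best rest
      else if PySem.Str.isIn key target || PySem.Str.isIn target key then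
        if 2 < bestRank then ftiB_go name target 2 ((info.find? (fun q => q.1 == "id")).map (·.2)) rest
        else ftiB_go name target bestRank best rest
      else ftiB_go name target bestRank best rest

def find_tileset_id_alt (tileset_name : String) (tileset_constants : List (String × List (String × Int))) : Option Int :=
  if tileset_name == "" then none
  else ftiB_go tileset_name (PySem.Str.lower tileset_name) 3 none tileset_constants

-- ===== PRECONDITION & SPEC =====
def pvPartialB (name k : String) : Bool :=
  PySem.Str.isIn (PySem.Str.lower k) (PySem.Str.lower name)
    || PySem.Str.isIn (PySem.Str.lower name) (PySem.Str.lower k)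

-- Pre_ excludes inputs where some entry whose key (case-insensitively / partially) matches the
-- name lacks an "id" field: there A (or B) raises KeyError, or A silently skips a matching entry.
def Pre_find_tileset_id (tileset_name : String) (tileset_constants : List (String × List (String × Int))) : Prop :=
  tileset_name = "" ∨
    (tileset_constants.all (fun p => !(pvPartialB tileset_name p.1) || p.2.any (fun q => q.1 == "id"))) = true
instance (tileset_name : String) (tileset_constants : List (String × List (String × Int))) : Decidable (Pre_find_tileset_id tileset_name tileset_constants) := by unfold Pre_find_tileset_id; infer_instance

def pvWitness_find_tileset_id : String × (List (String × List (String × Int))) :=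
  ("Overworld", [("OVERWORLD", [("id", 1)]), ("cave", [("id", 2)])])

def Spec_find_tileset_id (tileset_name : String) (tileset_constants : List (String × List (String × Int))) (out : Option Int) : Prop := out = find_tileset_id_alt tileset_name tileset_constants
instance (tileset_name : String) (tileset_constants : List (String × List (String × Int))) (out : Option Int) : Decidable (Spec_find_tileset_id tileset_name tileset_constants out) := by unfold Spec_find_tileset_id; infer_instance

-- ===== CLAIM (what is proved, stated in full; the proofs are below) =====
def Claim_equal_find_tileset_id : Prop := ∀ (tileset_name : String) (tileset_constants : List (String × List (String × Int))), Dom_find_tileset_id tileset_name tileset_constants → Pre_find_tileset_id tileset_name tileset_constants → Spec_find_tileset_id tileset_name tileset_constants (find_tileset_id tileset_name tileset_constants)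

-- ===== LEMMAS AND PROOFS =====

-- select the id of the first entry satisfying q, else fall back to b
def ftiSel (q : (String × List (String × Int)) → Bool)
    (tc : List (String × List (String × Int))) (b : Option Int) : Option Int :=
  match tc.find? q with
  | some p => ftiGetId p.2
  | none => b

lemma pv_isIn_self (s : String) : PySem.Str.isIn s s = true := by
  rw [PySem.Str.isIn_iff_infix]

lemma ciA_eq (name : String) (tc : List (String × List (String × Int))) :
    ftiA_ci name tc = (tc.find? (fun p => PySem.Str.lower p.1 == PySem.Str.lower name)).bind (fun p => ftiGetId p.2) := by
  induction tc with
  | nil => simp [ftiA_ci]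
  | cons h rest ih =>
    obtain ⟨k, info⟩ := h
    by_cases hk : (PySem.Str.lower k == PySem.Str.lower name) = true
    · simp [ftiA_ci, hk, List.find?_cons]
    · simp [ftiA_ci, hk, ih, List.find?_cons]

lemma paA_eq (name : String) (tc : List (String × List (String × Int))) :
    ftiA_pa name tc = (tc.find? (fun p => pvPartialB name p.1)).bind (fun p => ftiGetId p.2) := by
  induction tc with
  | nil => simp [ftiA_pa]
  | cons h rest ih =>
    obtain ⟨k, info⟩ := h
    by_cases hk : (PySem.Str.isIn (PySem.Str.lower k) (PySem.Str.lower name)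
        || PySem.Str.isIn (PySem.Str.lower name) (PySem.Str.lower k)) = true
    · rcases (by simpa using hk :
          PySem.Chars.isIn (PySem.Chars.lower k.toList) (PySem.Chars.lower name.toList) = true ∨
          PySem.Chars.isIn (PySem.Chars.lower name.toList) (PySem.Chars.lower k.toList) = true) with h1 | h1 <;>
        simp [ftiA_pa, pvPartialB, List.find?_cons, h1]
    · obtain ⟨h1, h2⟩ := (by simpa [not_or] using hk :
          PySem.Chars.isIn (PySem.Chars.lower k.toList) (PySem.Chars.lower name.toList) = false ∧
          PySem.Chars.isIn (PySem.Chars.lower name.toList) (PySem.Chars.lower k.toList) = false)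
      simp [ftiA_pa, pvPartialB, List.find?_cons, h1, h2, ih]

lemma go1_eq (name : String) (b : Option Int) (tc : List (String × List (String × Int))) :
    ftiB_go name (PySem.Str.lower name) 1 b tc = ftiSel (fun p => p.1 == name) tc b := by
  induction tc generalizing b with
  | nil => simp [ftiB_go, ftiSel]
  | cons h rest ih =>
    obtain ⟨k, info⟩ := h
    by_cases hk : (k == name) = true
    · simp [ftiB_go, hk, ftiSel, ftiGetId, List.find?_cons]
    · by_cases hci : (PySem.Str.lower k == PySem.Str.lower name) = true
      · simp [ftiB_go, hk, hci, ftiSel, ih, List.find?_cons]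
      · by_cases hpa : (PySem.Str.isIn (PySem.Str.lower k) (PySem.Str.lower name)
            || PySem.Str.isIn (PySem.Str.lower name) (PySem.Str.lower k)) = true
        · simp [ftiB_go, hk, hci, hpa, ftiSel, ih, List.find?_cons]
        · simp [ftiB_go, hk, hci, hpa, ftiSel, ih, List.find?_cons]

lemma go2_eq (name : String) (b : Option Int) (tc : List (String × List (String × Int))) :
    ftiB_go name (PySem.Str.lower name) 2 b tc =
      ftiSel (fun p => p.1 == name) tc
        (ftiSel (fun p => PySem.Str.lower p.1 == PySem.Str.lower name) tc b) := by
  induction tc generalizing b with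
  | nil => simp [ftiB_go, ftiSel]
  | cons h rest ih =>
    obtain ⟨k, info⟩ := h
    by_cases hk : (k == name) = true
    · simp [ftiB_go, hk, ftiSel, ftiGetId, List.find?_cons]
    · by_cases hci : (PySem.Str.lower k == PySem.Str.lower name) = true
      · simp [ftiB_go, hk, hci, ftiSel, ftiGetId, go1_eq, List.find?_cons]
      · by_cases hpa : (PySem.Str.isIn (PySem.Str.lower k) (PySem.Str.lower name)
            || PySem.Str.isIn (PySem.Str.lower name) (PySem.Str.lower k)) = true
        · simp [ftiB_go, hk, hci, hpa, ftiSel, ih, List.find?_cons]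
        · simp [ftiB_go, hk, hci, hpa, ftiSel, ih, List.find?_cons]

lemma go3_eq (name : String) (b : Option Int) (tc : List (String × List (String × Int))) :
    ftiB_go name (PySem.Str.lower name) 3 b tc =
      ftiSel (fun p => p.1 == name) tc
        (ftiSel (fun p => PySem.Str.lower p.1 == PySem.Str.lower name) tc
          (ftiSel (fun p => pvPartialB name p.1) tc b)) := by
  induction tc generalizing b with
  | nil => simp [ftiB_go, ftiSel]
  | cons h rest ih =>
    obtain ⟨k, info⟩ := h
    by_cases hk : (k == name) = true
    · simp [ftiB_go, hk, ftiSel, ftiGetId, List.find?_cons]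
    · by_cases hci : (PySem.Str.lower k == PySem.Str.lower name) = true
      · simp [ftiB_go, hk, hci, ftiSel, ftiGetId, go1_eq, List.find?_cons]
      · by_cases hpa : (PySem.Str.isIn (PySem.Str.lower k) (PySem.Str.lower name)
            || PySem.Str.isIn (PySem.Str.lower name) (PySem.Str.lower k)) = true
        · rcases (by simpa using hpa :
              PySem.Chars.isIn (PySem.Chars.lower k.toList) (PySem.Chars.lower name.toList) = true ∨
              PySem.Chars.isIn (PySem.Chars.lower name.toList) (PySem.Chars.lower k.toList) = true) with h1 | h1 <;>
            simp [ftiB_go, hk, hci, ftiSel, ftiGetId, go2_eq, pvPartialB, List.find?_cons, h1]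
        · obtain ⟨h1, h2⟩ := (by simpa [not_or] using hpa :
              PySem.Chars.isIn (PySem.Chars.lower k.toList) (PySem.Chars.lower name.toList) = false ∧
              PySem.Chars.isIn (PySem.Chars.lower name.toList) (PySem.Chars.lower k.toList) = false)
          simp [ftiB_go, hk, hci, h1, h2, ftiSel, ih, pvPartialB, List.find?_cons]

-- ===== VERDICT (by name: the statement is the Claim_ definition above) =====
theorem find_tileset_id_spec : Claim_equal_find_tileset_id := by
  intro name tc _dom hpre
  unfold Spec_find_tileset_id find_tileset_id find_tileset_id_alt
  by_cases hname : (name == "") = true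
  · simp [hname]
  · have hall : (tc.all fun p => !(pvPartialB name p.1) || p.2.any (fun q => q.1 == "id")) = true := by
      rcases hpre with h | h
      · exact absurd (by simp [h]) hname
      · exact h
    simp only [hname, if_false]
    rw [go3_eq, ciA_eq, paA_eq]
    unfold ftiSel
    cases hex : tc.find? (fun p => p.1 == name) with
    | some p => rfl
    | none =>
      cases hci : tc.find? (fun p => PySem.Str.lower p.1 == PySem.Str.lower name) with
      | some p =>
        have hcip := List.find?_some hci
        have hlow : PySem.Str.lower p.1 = PySem.Str.lower name := by simpa using hcip
        have hpa : pvPartialB name p.1 = true := by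
          unfold pvPartialB
          rw [hlow, pv_isIn_self]
          simp
        have hmem : p ∈ tc := List.mem_of_find?_eq_some hci
        have hid : (p.2.any (fun q => q.1 == "id")) = true := by
          have h2 := List.all_eq_true.mp hall p hmem
          simpa [hpa] using h2
        have hsome : (ftiGetId p.2).isSome = true := by
          obtain ⟨q, hq, hq2⟩ := List.any_eq_true.mp hid
          simp only [ftiGetId, Option.isSome_map]
          rw [List.find?_isSome]
          exact ⟨q, hq, hq2⟩
        obtain ⟨v, hv⟩ := Option.isSome_iff_exists.mp hsome
        simp [hv]
      | none =>
        cases hpa : tc.find? (fun p => pvPartialB name p.1) with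
        | some p => rfl
        | none => rfl
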